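-- pv_equiv track=rewrite | github.com/Tsuki-04/env-guardian | rules/structure.py | compare_env_files
-- ===== SOURCE A (Python) =====
-- def compare_env_files(env_vars, example_vars, strict_mode=False):
--     results = []
--
--     env_keys = set(env_vars.keys())
--     example_keys = set(example_vars.keys())
--
--     missing_keys = example_keys - env_keys
--     extra_keys = env_keys - example_keys
--
--     for key in sorted(missing_keys):
--         if strict_mode:
--             results.append(f"[ERROR] Missing variable in .env: {key}")
--         else:
--             results.append(f"[WARNING] Missing variable in .env: {key}")
--
--     for key in sorted(extra_keys):
--         results.append(f"[INFO] Undocumented variable in .env: {key}")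
--
--     return results
-- ===== SOURCE B (Python) =====
-- def compare_env_files(env_vars, example_vars, strict_mode=False):
--     missing = []
--     extra = []
--     for key in sorted(set(env_vars) | set(example_vars)):
--         in_env = key in env_vars
--         in_example = key in example_vars
--         if in_env and in_example:
--             continue
--         if in_example:
--             if strict_mode:
--                 missing.append("[ERROR] Missing variable in .env: " + key)
--             else:
--                 missing.append("[WARNING] Missing variable in .env: " + key)
--         else:
--             extra.append("[INFO] Undocumented variable in .env: " + key)
--     return missing + extra
-- ===== Notes on version B (the rewrite author's own statement) =====
-- stated objective: alternative
-- what changed: Replaces the two set-difference computations and two sorted passes by a single sorted pass over the union of the key sets, bucketing each key into a missing or extra list by membership and concatenating the buckets.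
import Mathlib
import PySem

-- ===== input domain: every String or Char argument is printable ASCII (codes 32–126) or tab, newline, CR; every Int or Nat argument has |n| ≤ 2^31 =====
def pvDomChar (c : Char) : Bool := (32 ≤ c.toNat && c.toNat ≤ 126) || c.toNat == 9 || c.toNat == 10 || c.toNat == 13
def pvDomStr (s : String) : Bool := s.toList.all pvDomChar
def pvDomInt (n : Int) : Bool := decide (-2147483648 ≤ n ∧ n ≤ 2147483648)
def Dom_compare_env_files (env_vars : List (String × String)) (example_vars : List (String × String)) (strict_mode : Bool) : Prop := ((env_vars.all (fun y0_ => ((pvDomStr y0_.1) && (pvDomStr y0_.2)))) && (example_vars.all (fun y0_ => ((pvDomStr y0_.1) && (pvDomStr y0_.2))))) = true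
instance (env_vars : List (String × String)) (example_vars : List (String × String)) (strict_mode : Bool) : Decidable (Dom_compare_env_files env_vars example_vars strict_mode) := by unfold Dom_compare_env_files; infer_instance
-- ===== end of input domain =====

-- B replaces A's two set-difference + sort passes by one sorted pass over the union of the
-- key sets, bucketing each key by membership (objective: alternative decomposition, same cost).

-- ===== PORT A =====
def compare_env_files (env_vars : List (String × String)) (example_vars : List (String × String)) (strict_mode : Bool) : List String :=
  let env_keys : PySem.Set String := PySem.Set.ofList (env_vars.map (·.1))
  let example_keys : PySem.Set String := PySem.Set.ofList (example_vars.map (·.1))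
  let missing_keys := PySem.Set.diff example_keys env_keys
  let extra_keys := PySem.Set.diff env_keys example_keys
  let results : List String :=
    (PySem.List.sorted missing_keys (fun x => x) false).foldl
      (fun results key =>
        if strict_mode then results ++ ["[ERROR] Missing variable in .env: " ++ key]
        else results ++ ["[WARNING] Missing variable in .env: " ++ key]) []
  (PySem.List.sorted extra_keys (fun x => x) false).foldl
    (fun results key => results ++ ["[INFO] Undocumented variable in .env: " ++ key]) results

-- ===== PORT B =====
-- the loop body of B's single pass (one iteration of 'for key in sorted(... | ...)')
def pvBucketStep (env_keys example_keys : PySem.Set String) (strict_mode : Bool)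
    (acc : List String × List String) (key : String) : List String × List String :=
  let in_env := PySem.Set.contains env_keys key
  let in_example := PySem.Set.contains example_keys key
  if in_env && in_example then acc
  else if in_example then
    (acc.1 ++ [if strict_mode then "[ERROR] Missing variable in .env: " ++ key
               else "[WARNING] Missing variable in .env: " ++ key], acc.2)
  else (acc.1, acc.2 ++ ["[INFO] Undocumented variable in .env: " ++ key])

def compare_env_files_alt (env_vars : List (String × String)) (example_vars : List (String × String)) (strict_mode : Bool) : List String :=
  let env_keys : PySem.Set String := PySem.Set.ofList (env_vars.map (·.1))
  let example_keys : PySem.Set String := PySem.Set.ofList (example_vars.map (·.1))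
  let buckets : List String × List String :=
    (PySem.List.sorted (PySem.Set.union env_keys example_keys) (fun x => x) false).foldl
      (pvBucketStep env_keys example_keys strict_mode) ([], [])
  buckets.1 ++ buckets.2

-- ===== PRECONDITION & SPEC =====
def Spec_compare_env_files (env_vars : List (String × String)) (example_vars : List (String × String)) (strict_mode : Bool) (out : List String) : Prop := out = compare_env_files_alt env_vars example_vars strict_mode
instance (env_vars : List (String × String)) (example_vars : List (String × String)) (strict_mode : Bool) (out : List String) : Decidable (Spec_compare_env_files env_vars example_vars strict_mode out) := by unfold Spec_compare_env_files; infer_instance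

-- ===== CLAIM (what is proved, stated in full; the proofs are below) =====
def Claim_equal_compare_env_files : Prop := ∀ (env_vars : List (String × String)) (example_vars : List (String × String)) (strict_mode : Bool), Dom_compare_env_files env_vars example_vars strict_mode → Spec_compare_env_files env_vars example_vars strict_mode (compare_env_files env_vars example_vars strict_mode)

-- ===== LEMMAS AND PROOFS =====

-- the two line-formatting functions
def pvMissLine (strict_mode : Bool) (key : String) : String :=
  if strict_mode then "[ERROR] Missing variable in .env: " ++ key
  else "[WARNING] Missing variable in .env: " ++ key

def pvInfoLine (key : String) : String := "[INFO] Undocumented variable in .env: " ++ key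

-- B's bucketing fold, characterised as two filters + maps
theorem pvFold_buckets (E X : PySem.Set String) (sm : Bool) (l : List String) (m e : List String) :
    l.foldl (pvBucketStep E X sm) (m, e)
    = (m ++ (l.filter (fun k => PySem.Set.contains X k && !PySem.Set.contains E k)).map (pvMissLine sm),
       e ++ (l.filter (fun k => !PySem.Set.contains X k && !(PySem.Set.contains E k && PySem.Set.contains X k))).map pvInfoLine) := by
  induction l generalizing m e with
  | nil => simp
  | cons k l ih =>
    rw [List.foldl_cons]
    by_cases hE : k ∈ E <;> by_cases hX : k ∈ X
    · rw [show pvBucketStep E X sm (m, e) k = (m, e) from by simp [pvBucketStep, hE, hX], ih]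
      simp [hE, hX]
    · rw [show pvBucketStep E X sm (m, e) k
            = (m, e ++ ["[INFO] Undocumented variable in .env: " ++ k]) from by
              simp [pvBucketStep, hE, hX], ih]
      simp [hE, hX, pvInfoLine]
    · rw [show pvBucketStep E X sm (m, e) k
            = (m ++ [if sm then "[ERROR] Missing variable in .env: " ++ k
                     else "[WARNING] Missing variable in .env: " ++ k], e) from by
              simp [pvBucketStep, hE, hX], ih]
      simp [hE, hX, pvMissLine]
    · rw [show pvBucketStep E X sm (m, e) k
            = (m, e ++ ["[INFO] Undocumented variable in .env: " ++ k]) from by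
              simp [pvBucketStep, hE, hX], ih]
      simp [hE, hX, pvInfoLine]

-- A's append loops, as maps
theorem pvFoldA_miss (sm : Bool) (l : List String) (init : List String) :
    l.foldl
      (fun results key =>
        if sm then results ++ ["[ERROR] Missing variable in .env: " ++ key]
        else results ++ ["[WARNING] Missing variable in .env: " ++ key]) init
    = init ++ l.map (pvMissLine sm) := by
  induction l generalizing init with
  | nil => simp
  | cons k l ih =>
    rw [List.foldl_cons]
    by_cases h : sm
    · rw [if_pos h, ih]; simp [pvMissLine, h]
    · rw [if_neg h, ih]; simp [pvMissLine, h]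

theorem pvFoldA_info (l : List String) (init : List String) :
    l.foldl (fun results key => results ++ ["[INFO] Undocumented variable in .env: " ++ key]) init
    = init ++ l.map pvInfoLine := by
  induction l generalizing init with
  | nil => simp
  | cons k l ih => rw [List.foldl_cons, ih]; simp [pvInfoLine]

-- a filter of the sorted union equals the sorted set S, when S = {x ∈ U | p x}
theorem pvSorted_filter_eq (S U : List String) (hS : S.Nodup) (hU : U.Nodup)
    (p : String → Bool) (hp : ∀ x, x ∈ S ↔ x ∈ U ∧ p x = true)
    : PySem.List.sorted S (fun x => x) false
      = (PySem.List.sorted U (fun x => x) false).filter p := by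
  apply PySem.List.sorted_eq_of_perm_of_pairwise_lt
  · -- permutation
    rw [List.perm_ext_iff_of_nodup]
    · intro x
      simp only [List.mem_filter, PySem.List.mem_sorted, hp]
    · exact ((PySem.List.sorted_perm U _ _).nodup_iff.mpr hU).filter p
    · exact hS
  · -- strictly increasing
    apply List.Pairwise.filter
    have hle := PySem.List.sorted_pairwise U (fun x => x)
    have hnd : (PySem.List.sorted U (fun x => x) false).Nodup :=
      (PySem.List.sorted_perm U _ _).nodup_iff.mpr hU
    exact (hle.and hnd).imp (by rintro a b ⟨h1, h2⟩; exact lt_of_le_of_ne h1 h2)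

-- ===== VERDICT (by name: the statement is the Claim_ definition above) =====
theorem compare_env_files_spec : Claim_equal_compare_env_files := by
  intro env_vars example_vars sm _
  unfold Spec_compare_env_files compare_env_files compare_env_files_alt
  set E : PySem.Set String := PySem.Set.ofList (env_vars.map (·.1)) with hEdef
  set X : PySem.Set String := PySem.Set.ofList (example_vars.map (·.1)) with hXdef
  have hE : E.Nodup := PySem.Set.nodup_ofList _
  have hX : X.Nodup := PySem.Set.nodup_ofList _
  simp only [pvFold_buckets, pvFoldA_miss, pvFoldA_info, List.nil_append]
  congr 1
  · -- missing bucket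
    congr 1
    apply pvSorted_filter_eq _ _ (PySem.Set.nodup_diff _ _ hX) (PySem.Set.nodup_union _ _ hE)
    intro x
    simp only [PySem.Set.mem_diff, PySem.Set.mem_union, Bool.and_eq_true, Bool.not_eq_true',
      ← Bool.not_eq_true, PySem.Set.contains_iff]
    tauto
  · -- extra bucket
    congr 1
    apply pvSorted_filter_eq _ _ (PySem.Set.nodup_diff _ _ hE) (PySem.Set.nodup_union _ _ hE)
    intro x
    simp only [PySem.Set.mem_diff, PySem.Set.mem_union, Bool.and_eq_true, Bool.not_eq_true',
      ← Bool.not_eq_true, PySem.Set.contains_iff]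
    tauto
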